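-- pv_equiv track=rewrite | github.com/AdamOtto/Daily-Challenges | Challenge221.py | Solution
-- ===== SOURCE A (Python) =====
-- def Solution(ar):
--     if ar <= 0:
--         return 0
--     count = 0
--     retVal = 0
--     while ar != 0:
--         if 1 & ar == 1:
--             retVal += pow(7, count)
--         ar >>= 1
--         count += 1
--     return retVal
-- ===== SOURCE B (Python) =====
-- def Solution(ar):
--     if ar <= 0:
--         return 0
--     result = 0
--     for ch in bin(ar)[2:]:
--         result = result * 7 + (ch == '1')
--     return result
-- ===== Notes on version B (the rewrite author's own statement) =====
-- stated objective: idiomatic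
-- what changed: Replaces the LSB-first while loop that tracks a bit position and recomputes pow(7,count) with a Horner evaluation over bin(ar) MSB-first, keeping only a running accumulator.
import Mathlib
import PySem

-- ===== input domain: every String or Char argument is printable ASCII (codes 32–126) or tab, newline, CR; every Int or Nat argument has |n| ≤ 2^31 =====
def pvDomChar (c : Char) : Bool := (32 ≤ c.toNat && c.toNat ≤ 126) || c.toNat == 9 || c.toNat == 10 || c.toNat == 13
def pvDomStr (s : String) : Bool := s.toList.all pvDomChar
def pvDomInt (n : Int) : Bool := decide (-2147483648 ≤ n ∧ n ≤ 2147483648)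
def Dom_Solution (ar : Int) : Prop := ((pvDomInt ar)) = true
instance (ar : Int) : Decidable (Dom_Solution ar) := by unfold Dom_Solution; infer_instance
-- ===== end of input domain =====

-- B is the Horner evaluation of the binary digits MSB-first; return value only, idiomatic rewrite of A's LSB-first power loop.

-- ===== PORT A =====
-- A's while loop: ar>0 throughout, so n : Nat; ar >>= 1 is n / 2, 1 & ar is n % 2.
def SolutionLoop (n : Nat) (count : Nat) (retVal : Int) : Int :=
  if n = 0 then retVal
  else SolutionLoop (n / 2) (count + 1) (retVal + if n % 2 = 1 then (7 : Int) ^ count else 0)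
decreasing_by exact Nat.div_lt_self (Nat.pos_of_ne_zero (by assumption)) (by norm_num)

def Solution (ar : Int) : Int :=
  if ar ≤ 0 then 0 else SolutionLoop ar.toNat 0 0

-- ===== PORT B =====
-- bin(ar)[2:] as the list of binary digits, most significant first
def binDigits (n : Nat) : List Int :=
  if n = 0 then [] else binDigits (n / 2) ++ [((n % 2 : Nat) : Int)]
decreasing_by exact Nat.div_lt_self (Nat.pos_of_ne_zero (by assumption)) (by norm_num)

def Solution_alt (ar : Int) : Int :=
  if ar ≤ 0 then 0
  else (binDigits ar.toNat).foldl (fun result d => result * 7 + d) 0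

-- ===== PRECONDITION & SPEC =====
def Spec_Solution (ar : Int) (out : Int) : Prop := out = Solution_alt ar
instance (ar : Int) (out : Int) : Decidable (Spec_Solution ar out) := by unfold Spec_Solution; infer_instance

-- ===== CLAIM (what is proved, stated in full; the proofs are below) =====
def Claim_equal_Solution : Prop := ∀ (ar : Int), Dom_Solution ar → Spec_Solution ar (Solution ar)

-- ===== LEMMAS AND PROOFS =====
-- the value "bits of n read as base-7 digits", LSB-first recurrence
def val7 (n : Nat) : Int :=
  if n = 0 then 0 else 7 * val7 (n / 2) + ((n % 2 : Nat) : Int)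
decreasing_by exact Nat.div_lt_self (Nat.pos_of_ne_zero (by assumption)) (by norm_num)

theorem loopA_eq (n : Nat) : ∀ (c : Nat) (r : Int),
    SolutionLoop n c r = r + 7 ^ c * val7 n := by
  induction n using Nat.strong_induction_on with
  | _ n ih =>
    intro c r
    rw [SolutionLoop, val7]
    by_cases h : n = 0
    · simp [h]
    · simp only [h, if_false]
      rw [ih (n / 2) (Nat.div_lt_self (Nat.pos_of_ne_zero h) (by norm_num))]
      have h2 : n % 2 = 0 ∨ n % 2 = 1 := Nat.mod_two_eq_zero_or_one n
      rcases h2 with h2 | h2 <;> simp [h2, pow_succ] <;> ring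

theorem foldl_horner (n : Nat) : ∀ (a : Int),
    (binDigits n).foldl (fun result d => result * 7 + d) a
      = a * 7 ^ (binDigits n).length + val7 n := by
  induction n using Nat.strong_induction_on with
  | _ n ih =>
    intro a
    rw [binDigits, val7]
    by_cases h : n = 0
    · simp [h]
    · simp only [h, if_false, List.foldl_append, List.foldl_cons, List.foldl_nil,
        List.length_append, List.length_cons, List.length_nil]
      rw [ih (n / 2) (Nat.div_lt_self (Nat.pos_of_ne_zero h) (by norm_num))]
      rw [pow_succ]
      ring

-- ===== VERDICT (by name: the statement is the Claim_ definition above) =====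
theorem Solution_spec : Claim_equal_Solution := by
  intro ar _
  unfold Spec_Solution Solution Solution_alt
  by_cases h : ar ≤ 0
  · simp [h]
  · simp only [h, if_false]
    rw [loopA_eq, foldl_horner]
    simp
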